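-- pv_equiv track=rewrite | github.com/Arcanada-one/output-guard | packages/python/src/output_guard/strategies/fix_unicode.py | fix_unicode
-- ===== SOURCE A (Python) =====
-- _HEX = set("0123456789abcdefABCDEF")
--
-- def fix_unicode(text: str) -> str:
--     out: list[str] = []
--     i = 0
--     n = len(text)
--     while i < n:
--         if text[i] == "\\" and i + 1 < n:
--             if text[i + 1] == "u":
--                 hex_slice = text[i + 2 : i + 6]
--                 if len(hex_slice) == 4 and all(c in _HEX for c in hex_slice):
--                     out.append(text[i : i + 6])
--                     i += 6
--                 else:
--                     hex_count = 0
--                     while (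
--                         hex_count < 4
--                         and i + 2 + hex_count < n
--                         and text[i + 2 + hex_count] in _HEX
--                     ):
--                         hex_count += 1
--                     out.append("\\uFFFD")
--                     i += 2 + hex_count
--                 continue
--             out.append(text[i])
--             if i + 1 < n:
--                 out.append(text[i + 1])
--             i += 2
--             continue
--         out.append(text[i])
--         i += 1
--     return "".join(out)
-- ===== SOURCE B (Python) =====
-- def fix_unicode(text: str) -> str:
--     segs = text.split("\\")
--     out = [segs[0]]
--     k = 1
--     while k < len(segs):
--         seg = segs[k]
--         if seg == "" and k + 1 < len(segs):
--             out.append("\\\\" + segs[k + 1])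
--             k += 2
--         elif seg == "":
--             out.append("\\")
--             k += 1
--         elif seg[0] == "u":
--             h = 0
--             while h < len(seg) - 1 and h < 4 and seg[1 + h] in "0123456789abcdefABCDEF":
--                 h += 1
--             if h == 4:
--                 out.append("\\" + seg)
--             else:
--                 out.append("\\uFFFD" + seg[1 + h:])
--             k += 1
--         else:
--             out.append("\\" + seg)
--             k += 1
--     return "".join(out)
-- ===== Notes on version B (the rewrite author's own statement) =====
-- stated objective: faster
-- what changed: Replaces the per-character index-driven while loop with a split on backslash followed by one pass over the resulting segments, classifying each segment (escaped pair, lone trailing backslash, unicode escape, plain escape) by its shape.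
import Mathlib
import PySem

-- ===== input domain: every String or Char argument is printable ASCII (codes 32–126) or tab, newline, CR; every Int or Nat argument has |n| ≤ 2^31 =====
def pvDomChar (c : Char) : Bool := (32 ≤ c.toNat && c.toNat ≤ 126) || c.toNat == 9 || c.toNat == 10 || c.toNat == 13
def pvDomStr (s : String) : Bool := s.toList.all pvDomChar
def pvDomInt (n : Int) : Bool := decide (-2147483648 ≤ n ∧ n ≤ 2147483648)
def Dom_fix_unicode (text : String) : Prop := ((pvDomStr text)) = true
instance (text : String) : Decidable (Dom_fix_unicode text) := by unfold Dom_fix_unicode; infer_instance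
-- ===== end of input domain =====

-- B replaces A's index-driven scan with slicing by a split on '\' plus one pass over the segments (one pass over split segments; measurably faster in Python by a constant factor).

-- ===== PORT A =====
-- _HEX = set("0123456789abcdefABCDEF")
def pvHexSet : PySem.Set Char := PySem.Set.ofList "0123456789abcdefABCDEF".toList
def aIsHex (c : Char) : Bool := c ∈ pvHexSet
def aHexCount (ds : List Char) (h : Nat) : Nat :=
  if h < 4 ∧ h < ds.length ∧ aIsHex (ds.getD h ' ') then aHexCount ds (h + 1) else h
termination_by 4 - h
def goA : List Char → List Char
  | [] => []
  | '\\' :: 'u' :: ds =>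
      let hex_slice := ds.take 4
      if hex_slice.length = 4 ∧ hex_slice.all aIsHex then
        List.take 6 ('\\' :: 'u' :: ds) ++ goA (ds.drop 4)
      else
        let hc := aHexCount ds 0
        ['\\', 'u', 'F', 'F', 'F', 'D'] ++ goA (ds.drop hc)
  | '\\' :: c :: cs => '\\' :: c :: goA cs
  | c :: cs => c :: goA cs
termination_by cs => cs.length
decreasing_by all_goals simp [List.length_drop] <;> omega

-- equation lemmas

def fix_unicode (text : String) : String := String.mk (goA text.toList)

-- ===== PORT B =====
def bIsHex (c : Char) : Bool := PySem.Chars.isIn [c] "0123456789abcdefABCDEF".toList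
def altHexRun : List Char → Nat → Nat
  | c :: tl, h => if h < 4 ∧ bIsHex c then altHexRun tl (h + 1) else h
  | [], h => h

def goSegs : List (List Char) → List Char
  | [] => []
  | [] :: s2 :: rest => '\\' :: '\\' :: (s2 ++ goSegs rest)
  | [[]] => ['\\']
  | (c :: tl) :: rest =>
      (if c = 'u' then
         let h := altHexRun tl 0
         if h = 4 then '\\' :: c :: tl
         else ['\\', 'u', 'F', 'F', 'F', 'D'] ++ tl.drop h
       else '\\' :: c :: tl) ++ goSegs rest
def goB : List (List Char) → List Char
  | [] => []
  | s0 :: rest => s0 ++ goSegs rest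


def fix_unicode_alt (text : String) : String :=
  String.mk (goB (List.splitOn '\\' text.toList))

-- ===== PRECONDITION & SPEC =====
def Spec_fix_unicode (text : String) (out : String) : Prop := out = fix_unicode_alt text
instance (text : String) (out : String) : Decidable (Spec_fix_unicode text out) := by unfold Spec_fix_unicode; infer_instance

-- ===== CLAIM (what is proved, stated in full; the proofs are below) =====
def Claim_equal_fix_unicode : Prop := ∀ (text : String), Dom_fix_unicode text → Spec_fix_unicode text (fix_unicode text)

-- ===== LEMMAS AND PROOFS =====

-- equation lemmas for goA
theorem goA_nil : goA [] = [] := by rw [goA]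
theorem goA_bu (ds : List Char) : goA ('\\' :: 'u' :: ds) =
    (if (ds.take 4).length = 4 ∧ (ds.take 4).all aIsHex then
      List.take 6 ('\\' :: 'u' :: ds) ++ goA (ds.drop 4)
    else ['\\', 'u', 'F', 'F', 'F', 'D'] ++ goA (ds.drop (aHexCount ds 0))) := by
  rw [goA]
theorem goA_esc (c : Char) (hc : c ≠ 'u') (cs : List Char) :
    goA ('\\' :: c :: cs) = '\\' :: c :: goA cs := by
  rw [goA.eq_def]
  simp [hc]
theorem goA_plain (c : Char) (hc : c ≠ '\\') (cs : List Char) :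
    goA (c :: cs) = c :: goA cs := by
  rw [goA.eq_def]
  rcases cs with _ | ⟨d, cs'⟩ <;> simp [hc]
theorem goA_single : goA ['\\'] = ['\\'] := by rw [goA.eq_def]; simp [goA_nil]

theorem hex_eq (c : Char) : aIsHex c = bIsHex c := by
  have ha : aIsHex c = true ↔ c ∈ "0123456789abcdefABCDEF".toList := by
    rw [aIsHex, pvHexSet]; simp [PySem.Set.mem_ofList]
  have h : bIsHex c = true ↔ c ∈ "0123456789abcdefABCDEF".toList := by
    rw [bIsHex, PySem.Chars.isIn_iff_infix, List.singleton_infix_iff]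
  cases hcb : bIsHex c <;> cases hca : aIsHex c <;> simp_all

-- ===== splitOn lemmas =====
theorem sp_nil : List.splitOn '\\' ([] : List Char) = [[]] := by decide
theorem sp_ne_nil (l : List Char) : List.splitOn '\\' l ≠ [] :=
  List.splitOnP_ne_nil _ l
theorem sp_cons_sep (l : List Char) : List.splitOn '\\' ('\\' :: l) = [] :: List.splitOn '\\' l := by
  simp [List.splitOn, List.splitOnP_cons]
theorem sp_cons_ne (c : Char) (hc : c ≠ '\\') (l : List Char) :
    List.splitOn '\\' (c :: l) = List.modifyHead (c :: ·) (List.splitOn '\\' l) := by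
  simp [List.splitOn, List.splitOnP_cons, hc]
theorem sp_prepend (p : List Char) (hp : ∀ c ∈ p, c ≠ '\\') (l : List Char) :
    List.splitOn '\\' (p ++ l) = List.modifyHead (p ++ ·) (List.splitOn '\\' l) := by
  induction p with
  | nil => cases h : List.splitOn '\\' l <;> simp [h]
  | cons c p ih =>
      simp only [List.cons_append]
      rw [sp_cons_ne c (hp c (by simp)) _, ih (fun d hd => hp d (by simp [hd]))]
      rcases h : List.splitOn '\\' l with _ | ⟨s0, segs⟩
      · exact absurd h (sp_ne_nil l)
      · simp
theorem sp_head (l : List Char) : ∃ segs, List.splitOn '\\' l =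
    (l.takeWhile (fun c => c ≠ '\\')) :: segs := by
  induction l with
  | nil => exact ⟨[], sp_nil⟩
  | cons c l ih =>
      rcases eq_or_ne c '\\' with rfl | hc
      · exact ⟨List.splitOn '\\' l, by simp [sp_cons_sep, List.takeWhile]⟩
      · obtain ⟨segs, hs⟩ := ih
        exact ⟨segs, by simp [sp_cons_ne c hc, hs, List.takeWhile, hc]⟩

-- ===== takeWhile/dropWhile facts =====
theorem tw_all (p : Char → Bool) (l : List Char) (c : Char) (h : c ∈ l.takeWhile p) :
    p c = true := List.mem_takeWhile_imp h
theorem dw_eq_drop (p : Char → Bool) (l : List Char) :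
    l.dropWhile p = l.drop (l.takeWhile p).length := by
  induction l with
  | nil => simp
  | cons c l ih => by_cases hc : p c <;> simp [List.dropWhile, List.takeWhile, hc, ih]
theorem dw_head (p : Char → Bool) (l : List Char) (d : Char)
    (h : (l.dropWhile p).head? = some d) : p d = false := by
  induction l with
  | nil => simp at h
  | cons c l ih =>
      by_cases hc : p c <;> simp [List.dropWhile, hc] at h
      · exact ih h
      · subst h; exact Bool.eq_false_iff.mpr hc
theorem tw_ads (p : Char → Bool) (l : List Char) : l.takeWhile p ++ l.dropWhile p = l :=
  List.takeWhile_append_dropWhile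

-- ===== hex-run lemmas =====
theorem hex_ne_bs (c : Char) (h : aIsHex c = true) : c ≠ '\\' := by
  intro he; subst he
  rw [show aIsHex '\\' = false from by decide] at h
  exact Bool.false_ne_true h

theorem althex_stop (hs : List Char) : ∀ (t : List Char) (h : Nat),
    (∀ c ∈ hs, bIsHex c = true) → h + hs.length < 4 →
    (∀ d, t.head? = some d → bIsHex d = false) →
    altHexRun (hs ++ t) h = h + hs.length := by
  induction hs with
  | nil =>
      intro t h _ _ ht
      cases t with
      | nil => simp [altHexRun]
      | cons d t' => simp [altHexRun, ht d rfl]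
  | cons c hs ih =>
      intro t h hall hlt ht
      simp only [List.cons_append, altHexRun]
      rw [if_pos ⟨by omega, hall c (by simp)⟩, ih t (h+1) (fun d hd => hall d (by simp [hd]))
        (by simp at hlt ⊢; omega) ht]
      simp; omega

theorem althex_four (hs : List Char) : ∀ (t : List Char) (h : Nat),
    (∀ c ∈ hs, bIsHex c = true) → h + hs.length = 4 →
    altHexRun (hs ++ t) h = 4 := by
  induction hs with
  | nil =>
      intro t h _ hlen
      cases t with
      | nil => simpa using hlen
      | cons d t' => simp at hlen; simp [altHexRun, hlen]
  | cons c hs ih =>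
      intro t h hall hlen
      simp only [List.cons_append, altHexRun]
      rw [if_pos ⟨by simp at hlen; omega, hall c (by simp)⟩,
        ih t (h+1) (fun d hd => hall d (by simp [hd])) (by simp at hlen ⊢; omega)]

theorem ahex_spec (hs t : List Char)
    (hall : ∀ c ∈ hs, aIsHex c = true) (hlt : hs.length < 4)
    (ht : ∀ d, t.head? = some d → aIsHex d = false) :
    ∀ h, h ≤ hs.length → aHexCount (hs ++ t) h = hs.length := by
  intro h hle
  induction hd : hs.length - h generalizing h with
  | zero =>
      have hh : h = hs.length := by omega
      subst hh
      rw [aHexCount]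
      cases t with
      | nil => rw [if_neg]; simp
      | cons d t' =>
          rw [if_neg]
          rintro ⟨-, -, hx⟩
          have : (hs ++ d :: t').getD hs.length ' ' = d := by
            simp [List.getD, List.getElem?_append_right (le_refl hs.length), List.getElem?_eq_getElem]
          rw [this, ht d rfl] at hx
          exact Bool.false_ne_true hx
  | succ n ih =>
      have hh : h < hs.length := by omega
      rw [aHexCount, if_pos, ih (h+1) (by omega) (by omega)]
      refine ⟨by omega, by simp; omega, ?_⟩
      have : (hs ++ t).getD h ' ' = hs[h] := by
        simp [List.getD, List.getElem?_append_left hh, List.getElem?_eq_getElem hh]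
      rw [this]
      exact hall _ (List.getElem_mem hh)

theorem main (cs : List Char) : goA cs = goB (List.splitOn '\\' cs) := by
  induction hn : cs.length using Nat.strong_induction_on generalizing cs with
  | _ n IH =>
  subst hn
  rcases cs with _ | ⟨c, cs2⟩
  · simp [goA_nil, goB, goSegs]
  by_cases hbs : c = '\\'
  case neg =>
    -- plain character
    rw [goA_plain c hbs, sp_cons_ne c hbs]
    obtain ⟨s0, segs, hsp⟩ : ∃ s0 segs, List.splitOn '\\' cs2 = s0 :: segs := by
      rcases h : List.splitOn '\\' cs2 with _ | ⟨s0, segs⟩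
      · exact absurd h (sp_ne_nil _)
      · exact ⟨s0, segs, rfl⟩
    rw [IH cs2.length (by simp) _ rfl, hsp, goB]
    simp [goB]
  subst hbs
  rcases cs2 with _ | ⟨d, ds⟩
  · -- lone trailing backslash
    simp [goA_single, sp_cons_sep, goB, goSegs]
  by_cases hdu : d = 'u'
  case pos =>
    subst hdu
    rw [goA_bu]
    by_cases hC : (ds.take 4).length = 4 ∧ (ds.take 4).all aIsHex
    · -- valid \uXXXX escape
      have h4 : 4 ≤ ds.length := by
        rcases hC with ⟨h1, -⟩; simp at h1; omega
      have hsplit : ds = ds.take 4 ++ ds.drop 4 := (List.take_append_drop 4 ds).symm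
      have hallhex : ∀ c ∈ ds.take 4, aIsHex c = true := by
        rcases hC with ⟨-, h2⟩; simpa [List.all_eq_true] using h2
      obtain ⟨s0, segs, hsp⟩ : ∃ s0 segs, List.splitOn '\\' (ds.drop 4) = s0 :: segs := by
        rcases h : List.splitOn '\\' (ds.drop 4) with _ | ⟨s0, segs⟩
        · exact absurd h (sp_ne_nil _)
        · exact ⟨s0, segs, rfl⟩
      have hne : ∀ c ∈ 'u' :: ds.take 4, c ≠ '\\' := by
        intro c hc
        rcases List.mem_cons.mp hc with rfl | hc
        · decide
        · exact hex_ne_bs c (hallhex c hc)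
      have hsp2 : List.splitOn '\\' ('\\' :: 'u' :: ds) =
          [] :: ('u' :: (ds.take 4 ++ s0)) :: segs := by
        conv_lhs => rw [show '\\' :: 'u' :: ds = '\\' :: (('u' :: ds.take 4) ++ ds.drop 4) from by
          simp only [List.cons_append, ← hsplit]]
        rw [sp_cons_sep, sp_prepend _ hne, hsp]
        simp
      rw [if_pos hC, hsp2]
      have hrun : altHexRun (ds.take 4 ++ s0) 0 = 4 := by
        apply althex_four _ _ 0 (fun c hc => by rw [← hex_eq]; exact hallhex c hc)
        simp [hC.1]
      have hIH : goA (ds.drop 4) = s0 ++ goSegs segs := by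
        rw [IH (ds.drop 4).length (by simp; omega) _ rfl, hsp, goB]
      simp only [goB, goSegs, hrun]
      rw [hIH, show List.take 6 ('\\' :: 'u' :: ds) = '\\' :: 'u' :: ds.take 4 from by simp]
      simp
    · -- malformed escape
      rw [if_neg hC]
      set hs := ds.takeWhile aIsHex with hhs
      set t := ds.dropWhile aIsHex with ht
      have hsplit : ds = hs ++ t := (tw_ads aIsHex ds).symm
      have hallhex : ∀ c ∈ hs, aIsHex c = true := fun c hc => tw_all aIsHex ds c hc
      have hthead : ∀ e, t.head? = some e → aIsHex e = false := fun e he => dw_head aIsHex ds e he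
      have hr4 : hs.length < 4 := by
        by_contra hge
        push_neg at hge
        apply hC
        have htake : ds.take 4 = hs.take 4 := by
          conv_lhs => rw [hsplit]
          exact List.take_append_of_le_length hge
        constructor
        · simp [htake]; omega
        · rw [htake, List.all_eq_true]
          intro c hc
          exact hallhex c (List.take_subset 4 hs hc)
      have hhc : aHexCount ds 0 = hs.length := by
        conv_lhs => rw [hsplit]
        exact ahex_spec hs t hallhex hr4 hthead 0 (by omega)
      have hdrop : ds.drop (aHexCount ds 0) = t := by
        rw [hhc, hhs, ← dw_eq_drop]
      obtain ⟨segt, hsp⟩ := sp_head t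
      set s0t := t.takeWhile (fun c => c ≠ '\\') with hs0t
      have hs0thead : ∀ e, s0t.head? = some e → bIsHex e = false := by
        intro e he
        rw [← hex_eq]
        apply hthead
        rcases t with _ | ⟨f, t'⟩
        · simp [hs0t] at he
        · by_cases hf : f = '\\'
          · simp [hs0t, List.takeWhile, hf] at he
          · simp [hs0t, List.takeWhile, hf] at he
            simp [he]
      have hne : ∀ c ∈ 'u' :: hs, c ≠ '\\' := by
        intro c hc
        rcases List.mem_cons.mp hc with rfl | hc
        · decide
        · exact hex_ne_bs c (hallhex c hc)
      have hsp2 : List.splitOn '\\' ('\\' :: 'u' :: ds) =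
          [] :: ('u' :: (hs ++ s0t)) :: segt := by
        conv_lhs => rw [show '\\' :: 'u' :: ds = '\\' :: (('u' :: hs) ++ t) from by
          simp only [List.cons_append, ← hsplit]]
        rw [sp_cons_sep, sp_prepend _ hne, hsp]
        simp
      rw [hsp2]
      have hrun : altHexRun (hs ++ s0t) 0 = hs.length := by
        have := althex_stop hs s0t 0 (fun c hc => by rw [← hex_eq]; exact hallhex c hc)
          (by omega) hs0thead
        simpa using this
      have hIH : goA t = s0t ++ goSegs segt := by
        rw [IH t.length ?_ _ rfl, hsp, goB]
        have hlt : t.length ≤ ds.length := by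
          rw [ht]; exact List.length_dropWhile_le _ _
        simp only [List.length_cons]
        omega
      simp only [goB, goSegs, hrun, if_neg (by omega : ¬ hs.length = 4)]
      rw [hdrop, hIH, List.drop_left]
      simp
  -- escaped ordinary character (d ≠ 'u')
  rw [goA_esc d hdu, sp_cons_sep]
  obtain ⟨s0, segs, hsp⟩ : ∃ s0 segs, List.splitOn '\\' ds = s0 :: segs := by
    rcases h : List.splitOn '\\' ds with _ | ⟨s0, segs⟩
    · exact absurd h (sp_ne_nil _)
    · exact ⟨s0, segs, rfl⟩
  have hIH : goA ds = s0 ++ goSegs segs := by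
    rw [IH ds.length (by simp) _ rfl, hsp, goB]
  by_cases hdb : d = '\\'
  · subst hdb
    rw [sp_cons_sep, hsp]
    simp [goB, goSegs, hIH]
  · rw [sp_cons_ne d hdb, hsp]
    simp only [List.modifyHead]
    simp [goB, goSegs, hdu, hIH]

-- ===== VERDICT (by name: the statement is the Claim_ definition above) =====
theorem fix_unicode_spec : Claim_equal_fix_unicode := by
  intro text _
  unfold Spec_fix_unicode fix_unicode fix_unicode_alt
  rw [main]
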